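-- pv_equiv track=rewrite | github.com/qgzm/LeetCode | demo16/1624. 两个相同字符之间的最长子字符串.py | maxLengthBetweenEqualCharacters
-- ===== SOURCE A (Python) =====
-- def maxLengthBetweenEqualCharacters(s: str) -> int:
--     alph = {}
--     ans = -1
--     for i, alp in enumerate(s):
--         if alp not in alph:
--             alph[alp] = i
--         else:
--             ans = max(i - alph[alp] - 1, ans)
--
--     return ans
-- ===== SOURCE B (Python) =====
-- def maxLengthBetweenEqualCharacters(s: str) -> int:
--     ans = -1
--     for c in set(s):
--         ans = max(ans, s.rfind(c) - s.find(c) - 1)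
--     return ans
-- ===== Notes on version B (the rewrite author's own statement) =====
-- stated objective: alternative
-- what changed: Instead of one forward pass maintaining a dict of first occurrences, B iterates over the set of distinct characters and takes max of s.rfind(c) - s.find(c) - 1 per character; single-occurrence chars contribute -1 and never win. Measured faster because the k per-character scans are C-level str.find/str.rfind instead of a Python-bytecode loop over every index.
import Mathlib
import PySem

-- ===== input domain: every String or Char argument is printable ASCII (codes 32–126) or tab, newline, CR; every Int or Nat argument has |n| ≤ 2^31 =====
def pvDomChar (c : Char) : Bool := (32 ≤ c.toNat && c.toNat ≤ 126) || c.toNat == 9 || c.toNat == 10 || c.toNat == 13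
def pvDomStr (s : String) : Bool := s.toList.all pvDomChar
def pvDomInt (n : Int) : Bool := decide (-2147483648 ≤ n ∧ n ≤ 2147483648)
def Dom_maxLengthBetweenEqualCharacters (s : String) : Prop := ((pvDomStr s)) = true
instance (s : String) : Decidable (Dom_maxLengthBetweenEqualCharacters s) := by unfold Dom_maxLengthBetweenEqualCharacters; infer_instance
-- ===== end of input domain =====

-- B replaces A's single forward pass with a dict of first occurrences by a loop over the
-- distinct characters, taking max of s.rfind(c) - s.find(c) - 1 per character (an alternative traversal; a timing run measured it faster).

-- ===== PORT A =====
def maxLengthBetweenEqualCharacters (s : String) : Int :=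
  ((PySem.List.enumerate s.toList).foldl
    (fun (st : PySem.Dict Char Int × Int) (p : Int × Char) =>
      if st.1.contains p.2 = false then (st.1.insert p.2 p.1, st.2)
      else (st.1, max (p.1 - st.1.getD p.2 0 - 1) st.2))
    (PySem.Dict.empty, -1)).2

-- ===== PORT B =====
def maxLengthBetweenEqualCharacters_alt (s : String) : Int :=
  (PySem.Set.ofList s.toList).foldl
    (fun ans c =>
      max ans (PySem.Str.rfind s (String.ofList [c]) - PySem.Str.find s (String.ofList [c]) - 1))
    (-1)

-- ===== PRECONDITION & SPEC =====
def Spec_maxLengthBetweenEqualCharacters (s : String) (out : Int) : Prop := out = maxLengthBetweenEqualCharacters_alt s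
instance (s : String) (out : Int) : Decidable (Spec_maxLengthBetweenEqualCharacters s out) := by unfold Spec_maxLengthBetweenEqualCharacters; infer_instance

-- ===== CLAIM (what is proved, stated in full; the proofs are below) =====
def Claim_equal_maxLengthBetweenEqualCharacters : Prop := ∀ (s : String), Dom_maxLengthBetweenEqualCharacters s → Spec_maxLengthBetweenEqualCharacters s (maxLengthBetweenEqualCharacters s)

-- ===== LEMMAS AND PROOFS =====

theorem singleton_prefix_iff {c : Char} {l : List Char} : [c] <+: l ↔ l.head? = some c := by
  cases l with
  | nil => simp
  | cons x t =>
    constructor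
    · rintro ⟨r, hr⟩; simp at hr; simp [hr.1]
    · intro h; simp at h; exact ⟨t, by simp [h]⟩

theorem singleton_isPrefixOf_iff {c : Char} {l : List Char} :
    [c].isPrefixOf l = true ↔ l.head? = some c := by
  rw [List.isPrefixOf_iff_prefix]; exact singleton_prefix_iff

-- find of a character occurring first at position pre.length
theorem find_first (pre suf : List Char) (c : Char) (hc : c ∉ pre) :
    PySem.Chars.find (pre ++ c :: suf) [c] = (pre.length : Int) := by
  set L := pre ++ c :: suf with hL
  have hinf : [c] <:+: L := ⟨pre, suf, by simp [hL]⟩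
  have h0 : 0 ≤ PySem.Chars.find L [c] := (PySem.Chars.find_nonneg_iff L [c]).2 hinf
  obtain ⟨hpre, hmin⟩ := PySem.Chars.find_spec (s := L) (sub := [c]) h0
  set m := (PySem.Chars.find L [c]).toNat with hm
  have hple : [c] <+: L.drop pre.length := by
    rw [hL, List.drop_append_of_le_length (le_refl _)]
    simp
  have hmle : m ≤ pre.length := by
    by_contra h
    exact hmin pre.length (by omega) hple
  have hme : m = pre.length := by
    by_contra hne
    have hlt : m < pre.length := by omega
    have hhead : (L.drop m).head? = some c := singleton_prefix_iff.1 hpre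
    rw [hL, List.drop_append_of_le_length (by omega)] at hhead
    cases hdm : pre.drop m with
    | nil =>
      have := congrArg List.length hdm
      simp at this; omega
    | cons x xs =>
      rw [hdm] at hhead
      simp at hhead
      have hx : x ∈ pre := by
        have : x ∈ pre.drop m := by rw [hdm]; exact List.mem_cons_self
        exact List.mem_of_mem_drop this
      exact hc (hhead ▸ hx)
  omega

-- rfind is an upper bound for every occurrence index ≤ the scan start
theorem rfind_go_zero (L sub : List Char) :
    PySem.Chars.rfind.go L sub 0 = if sub.isPrefixOf L then 0 else -1 := rfl

theorem rfind_go_succ (L sub : List Char) (n : ℕ) :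
    PySem.Chars.rfind.go L sub (n + 1)
      = if sub.isPrefixOf (List.drop (n + 1) L) then ((n : Int) + 1)
        else PySem.Chars.rfind.go L sub n := rfl

theorem rfind_go_ge (L : List Char) (c : Char) :
    ∀ n j : ℕ, j ≤ n → L[j]? = some c → (j : Int) ≤ PySem.Chars.rfind.go L [c] n := by
  intro n
  induction n with
  | zero =>
    intro j hj hLj
    interval_cases j
    have hpl : [c].isPrefixOf L = true := by
      rw [singleton_isPrefixOf_iff, List.head?_eq_getElem?]; exact hLj
    rw [rfind_go_zero, if_pos hpl]; simp
  | succ n ih =>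
    intro j hj hLj
    rw [rfind_go_succ]
    by_cases hp : [c].isPrefixOf (List.drop (n + 1) L) = true
    · rw [if_pos hp]
      exact_mod_cast (by omega : j ≤ n + 1)
    · rw [if_neg hp]
      rcases Nat.lt_or_ge j (n + 1) with h | h
      · exact ih j (by omega) hLj
      · exfalso
        have hje : j = n + 1 := by omega
        apply hp
        rw [singleton_isPrefixOf_iff, List.head?_drop, ← hje]
        exact hLj

-- a nonnegative rfind result points at an occurrence
theorem rfind_go_sound (L : List Char) (c : Char) :
    ∀ n : ℕ, 0 ≤ PySem.Chars.rfind.go L [c] n →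
      ∃ j : ℕ, PySem.Chars.rfind.go L [c] n = (j : Int) ∧ L[j]? = some c := by
  intro n
  induction n with
  | zero =>
    intro h
    rw [rfind_go_zero] at h ⊢
    by_cases hp : [c].isPrefixOf L = true
    · refine ⟨0, by simp [hp], ?_⟩
      rw [← List.head?_eq_getElem?]
      exact singleton_isPrefixOf_iff.1 hp
    · simp [hp] at h
  | succ n ih =>
    intro h
    rw [rfind_go_succ] at h ⊢
    by_cases hp : [c].isPrefixOf (List.drop (n + 1) L) = true
    · refine ⟨n + 1, by simp [hp], ?_⟩
      rw [← List.head?_drop]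
      exact singleton_isPrefixOf_iff.1 hp
    · rw [if_neg hp] at h ⊢
      exact ih h

-- generic max-fold lemmas
theorem foldl_max_le {α : Type} (l : List α) (f : α → Int) (b : Int) :
    ∀ a : Int, a ≤ b → (∀ x ∈ l, f x ≤ b) →
    l.foldl (fun acc x => max acc (f x)) a ≤ b := by
  induction l with
  | nil => intro a ha _; exact ha
  | cons x t ih =>
    intro a ha h
    exact ih _ (max_le ha (h x List.mem_cons_self)) (fun y hy => h y (List.mem_cons_of_mem _ hy))

theorem init_le_foldl_max {α : Type} (l : List α) (f : α → Int) (a : Int) :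
    a ≤ l.foldl (fun acc x => max acc (f x)) a := by
  induction l generalizing a with
  | nil => exact le_refl a
  | cons x t ih => exact le_trans (le_max_left _ _) (ih (max a (f x)))

theorem mem_le_foldl_max {α : Type} (l : List α) (f : α → Int) (x : α) :
    x ∈ l → ∀ a : Int, f x ≤ l.foldl (fun acc x => max acc (f x)) a := by
  induction l with
  | nil => intro hx; cases hx
  | cons y t ih =>
    intro hx a
    rcases List.mem_cons.1 hx with h | h
    · subst h
      exact le_trans (le_max_right a (f x)) (init_le_foldl_max t f _)
    · exact ih h _

-- the loop invariant: A's fold with a dict mapping every character of pre to its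
-- first index in L equals the enumerate-max fold, for any accumulator a ≥ -1
theorem loop_eq (L : List Char) :
    ∀ (suf pre : List Char) (d : PySem.Dict Char Int) (a : Int),
    L = pre ++ suf →
    (-1 : Int) ≤ a →
    (∀ c, d.contains c = true ↔ c ∈ pre) →
    (∀ c, c ∈ pre → d.getD c 0 = PySem.Chars.find L [c]) →
    ((PySem.List.enumerate suf (pre.length : Int)).foldl
      (fun (st : PySem.Dict Char Int × Int) (p : Int × Char) =>
        if st.1.contains p.2 = false then (st.1.insert p.2 p.1, st.2)
        else (st.1, max (p.1 - st.1.getD p.2 0 - 1) st.2)) (d, a)).2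
    = (PySem.List.enumerate suf (pre.length : Int)).foldl
        (fun ans p => max ans (p.1 - PySem.Chars.find L [p.2] - 1)) a := by
  intro suf
  induction suf with
  | nil => intro pre d a _ _ _ _; simp [PySem.List.enumerate_nil]
  | cons c suf' ih =>
    intro pre d a hLpre ha hcont hval
    rw [PySem.List.enumerate_cons, List.foldl_cons, List.foldl_cons]
    by_cases hmem : c ∈ pre
    · have hct : d.contains c = true := (hcont c).2 hmem
      rw [hct, if_neg (by decide)]
      dsimp only
      have hfind : d.getD c 0 = PySem.Chars.find L [c] := hval c hmem
      have hstep := ih (pre ++ [c]) d (max ((pre.length : Int) - d.getD c 0 - 1) a)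
        (by simp [hLpre]) (le_trans ha (le_max_right _ _))
        (fun c' => by
          rw [hcont c', List.mem_append, List.mem_singleton]
          constructor
          · exact Or.inl
          · rintro (h | h)
            · exact h
            · exact h ▸ hmem)
        (fun c' hc' => by
          rcases List.mem_append.1 hc' with h | h
          · exact hval c' h
          · rw [List.mem_singleton] at h
            exact hval c' (h ▸ hmem))
      simp only [List.length_append, List.length_cons, List.length_nil] at hstep
      push_cast at hstep
      rw [hstep, hfind, max_comm]
    · have hct : d.contains c = false := by
        rcases Bool.eq_false_or_eq_true (d.contains c) with h | h
        · exact absurd ((hcont c).1 h) hmem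
        · exact h
      rw [hct, if_pos rfl]
      dsimp only
      have hF : PySem.Chars.find L [c] = (pre.length : Int) := by
        rw [hLpre]; exact find_first pre suf' c hmem
      have hstep := ih (pre ++ [c]) (d.insert c (pre.length : Int)) a
        (by simp [hLpre]) ha
        (fun c' => by
          rw [PySem.Dict.contains_insert, List.mem_append, List.mem_singleton]
          constructor
          · intro h
            rcases Bool.or_eq_true_iff.1 h with h | h
            · exact Or.inr (by simpa using h)
            · exact Or.inl ((hcont c').1 h)
          · rintro (h | h)
            · rw [(hcont c').2 h, Bool.or_true]
            · simp [h]
          )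
        (fun c' hc' => by
          rw [PySem.Dict.getD_insert]
          rcases List.mem_append.1 hc' with h | h
          · have hne : c' ≠ c := fun he => hmem (he ▸ h)
            rw [if_neg hne]
            exact hval c' h
          · rw [List.mem_singleton] at h
            rw [if_pos h, h, hF])
      simp only [List.length_append, List.length_cons, List.length_nil] at hstep
      push_cast at hstep
      rw [hstep, hF]
      have hmx : max a ((pre.length : Int) - (pre.length : Int) - 1) = a := by omega
      rw [hmx]

-- the enumerate-max fold equals B's per-distinct-character fold
theorem mid_eq_alt (L : List Char) :
    (PySem.List.enumerate L).foldl
      (fun ans p => max ans (p.1 - PySem.Chars.find L [p.2] - 1)) (-1)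
    = (PySem.Set.ofList L).foldl
        (fun ans c => max ans (PySem.Chars.rfind L [c] - PySem.Chars.find L [c] - 1)) (-1) := by
  apply le_antisymm
  · apply foldl_max_le
    · exact init_le_foldl_max _ _ _
    · rintro ⟨i, c⟩ hp
      rcases (PySem.List.mem_enumerate_iff _ _ _).1 hp with ⟨k, hk, hpk⟩
      have hik : i = (k : Int) ∧ c = L[k] := by
        have := hpk
        simp at this
        exact ⟨this.1, this.2⟩
      have hcL : c ∈ L := hik.2 ▸ List.getElem_mem hk
      have hle : (k : Int) ≤ PySem.Chars.rfind L [c] := by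
        unfold PySem.Chars.rfind
        exact rfind_go_ge L c L.length k (by omega) (by rw [hik.2]; simp [hk])
      have hterm : i - PySem.Chars.find L [c] - 1
          ≤ PySem.Chars.rfind L [c] - PySem.Chars.find L [c] - 1 := by
        rw [hik.1]; omega
      exact le_trans hterm
        (mem_le_foldl_max _ _ c ((PySem.Set.mem_ofList _ _).2 hcL) _)
  · apply foldl_max_le
    · exact init_le_foldl_max _ _ _
    · intro c hc
      have hcL : c ∈ L := (PySem.Set.mem_ofList _ _).1 hc
      obtain ⟨k, hk, hLk⟩ := List.mem_iff_getElem.1 hcL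
      have h0 : 0 ≤ PySem.Chars.rfind L [c] := by
        unfold PySem.Chars.rfind
        exact le_trans (by omega) (rfind_go_ge L c L.length k (by omega) (by simp [hk, hLk]))
      obtain ⟨j, hje, hLj⟩ := rfind_go_sound L c L.length h0
      have hjlt : j < L.length := by
        by_contra h
        rw [List.getElem?_eq_none (by omega)] at hLj
        cases hLj
      have hmem : ((j : Int), c) ∈ PySem.List.enumerate L := by
        rw [PySem.List.mem_enumerate_iff _ _ _]
        refine ⟨j, hjlt, ?_⟩
        have : L[j] = c := by
          have := hLj; rw [List.getElem?_eq_getElem hjlt] at this; exact Option.some.inj this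
        simp [this]
      have hterm := mem_le_foldl_max (PySem.List.enumerate L)
        (fun p => p.1 - PySem.Chars.find L [p.2] - 1) _ hmem (-1)
      have hr : PySem.Chars.rfind L [c] = (j : Int) := by
        unfold PySem.Chars.rfind; exact hje
      rw [hr]
      exact hterm

-- ===== VERDICT (by name: the statement is the Claim_ definition above) =====
theorem maxLengthBetweenEqualCharacters_spec : Claim_equal_maxLengthBetweenEqualCharacters := by
  intro s _
  unfold Spec_maxLengthBetweenEqualCharacters maxLengthBetweenEqualCharacters maxLengthBetweenEqualCharacters_alt
  have h := loop_eq s.toList s.toList [] PySem.Dict.empty (-1) (by simp) (le_refl _)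
    (fun c => by simp [PySem.Dict.contains_empty])
    (fun c hc => by simp at hc)
  simp only [List.length_nil, Nat.cast_zero] at h
  rw [h]
  have h2 := mid_eq_alt s.toList
  simp only [PySem.Str.find_eq, PySem.Str.rfind_eq, String.toList_ofList]
  exact h2
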